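-- pv_equiv track=rewrite | github.com/SimonMekonnen/A2SV | 2433-find-the-original-array-of-prefix-xor/2433-find-the-original-array-of-prefix-xor.py | findArray
-- ===== SOURCE A (Python) =====
-- from typing import List
--
-- def findArray(pref: List[int]) -> List[int]:
--     ans = [0 for _ in range(len(pref))]
--     ans[0] = pref[0]
--     tally = ans[0]
--     for i in range(1, len(pref)):
--         ans[i] = pref[i] ^ tally
--         tally ^= ans[i]
--     return ans
-- ===== SOURCE B (Python) =====
-- from typing import List
--
-- def findArray(pref: List[int]) -> List[int]:
--     # each element is the xor of adjacent prefix values; no running accumulator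
--     return [pref[0]] + [b ^ a for a, b in zip(pref, pref[1:])]
-- ===== Notes on version B (the rewrite author's own statement) =====
-- stated objective: simpler
-- what changed: Replaced the running-tally loop with in-place index assignment by a stateless pairwise zip comprehension: each element is just pref[i] ^ pref[i-1], no accumulator and no preallocated array.
import Mathlib
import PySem

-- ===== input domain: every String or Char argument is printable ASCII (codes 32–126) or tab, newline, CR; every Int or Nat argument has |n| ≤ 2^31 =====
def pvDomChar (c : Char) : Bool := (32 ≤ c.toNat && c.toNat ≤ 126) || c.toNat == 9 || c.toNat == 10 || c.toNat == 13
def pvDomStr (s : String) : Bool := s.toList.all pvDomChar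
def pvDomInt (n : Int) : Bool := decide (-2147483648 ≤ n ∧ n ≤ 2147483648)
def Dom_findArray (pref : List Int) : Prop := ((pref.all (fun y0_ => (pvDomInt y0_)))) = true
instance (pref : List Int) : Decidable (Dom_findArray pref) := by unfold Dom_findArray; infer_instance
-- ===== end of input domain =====

-- B replaces A's running-tally loop by a stateless pairwise zip (pref[i] ^ pref[i-1]); objective: simpler.

-- ===== PORT A =====
-- A: ans = [0]*n; ans[0] = pref[0]; tally = ans[0]; for i in range(1, n): ans[i] = pref[i] ^ tally; tally ^= ans[i].
-- pref[0] / ans[0] raise IndexError on empty pref (outside Pre_); there the port's pyGetD default is never relied on.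
def findArray (pref : List Int) : List Int :=
  let ans := (List.replicate pref.length 0).set 0 (PySem.List.pyGetD pref 0 0)
  let tally := PySem.List.pyGetD ans 0 0
  ((PySem.List.pyRange 1 pref.length).foldl
    (fun (st : List Int × Int) i =>
      let v := PySem.Int.bxor (PySem.List.pyGetD pref i 0) st.2
      (st.1.set i.toNat v, PySem.Int.bxor st.2 v))
    (ans, tally)).1

-- ===== PORT B =====
-- B: [pref[0]] + [b ^ a for a, b in zip(pref, pref[1:])]  (pref[0] raises on empty pref, outside Pre_)
def findArray_alt (pref : List Int) : List Int :=
  match pref with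
  | [] => []
  | h :: t => h :: (((h :: t).zip t).map (fun p => PySem.Int.bxor p.2 p.1))

-- ===== PRECONDITION & SPEC =====
-- Pre_ excludes only the empty list, on which both Pythons raise IndexError (pref[0]).
def Pre_findArray (pref : List Int) : Prop := pref ≠ []
instance (pref : List Int) : Decidable (Pre_findArray pref) := by unfold Pre_findArray; infer_instance
def pvWitness_findArray : List Int := [5, 2, 0, 3, 1]

def Spec_findArray (pref : List Int) (out : List Int) : Prop := out = findArray_alt pref
instance (pref : List Int) (out : List Int) : Decidable (Spec_findArray pref out) := by unfold Spec_findArray; infer_instance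

-- ===== CLAIM (what is proved, stated in full; the proofs are below) =====
def Claim_equal_findArray : Prop := ∀ (pref : List Int), Dom_findArray pref → Pre_findArray pref → Spec_findArray pref (findArray pref)

-- ===== LEMMAS AND PROOFS =====

theorem nat_xor_cancel (m n : Nat) : n ^^^ (m ^^^ n) = m := by
  rw [Nat.xor_comm m n, ← Nat.xor_assoc, Nat.xor_self, Nat.zero_xor]

theorem bxor_cancel (a p : Int) : PySem.Int.bxor a (PySem.Int.bxor p a) = p := by
  unfold PySem.Int.bxor
  by_cases h1 : 0 ≤ a <;> by_cases h2 : 0 ≤ p <;>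
    simp only [h1, h2, if_false, if_pos] <;> split_ifs <;>
    simp_all [nat_xor_cancel] <;> omega

theorem alt_length (pref : List Int) (h : pref ≠ []) :
    (findArray_alt pref).length = pref.length := by
  match pref with
  | [] => simp at h
  | h0 :: t =>
    simp [findArray_alt, List.length_zip]

theorem alt_getD (pref : List Int) (k : Nat) (hk1 : 1 ≤ k) (hk2 : k < pref.length) :
    (findArray_alt pref).getD k 0 =
      PySem.Int.bxor (pref.getD k 0) (pref.getD (k - 1) 0) := by
  match pref with
  | [] => simp at hk2
  | h0 :: t =>
    obtain ⟨j, rfl⟩ : ∃ j, k = j + 1 := ⟨k - 1, by omega⟩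
    have hj : j < t.length := by simpa using hk2
    have hj' : j < (h0 :: t).length := by simp; omega
    have hm : j < (((h0 :: t).zip t).map
        (fun p : Int × Int => PySem.Int.bxor p.2 p.1)).length := by
      simp [List.length_zip]; omega
    have lhs : (findArray_alt (h0 :: t)).getD (j + 1) 0
        = PySem.Int.bxor t[j] ((h0 :: t)[j]'hj') := by
      show ((((h0 :: t).zip t).map (fun p : Int × Int => PySem.Int.bxor p.2 p.1)).getD j 0) = _
      rw [List.getD_eq_getElem _ _ hm]
      simp [List.getElem_zip]
    have r1 : ((h0 :: t) : List Int).getD (j + 1) 0 = t[j] := by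
      rw [List.getD_cons_succ, List.getD_eq_getElem _ _ hj]
    have r2 : ((h0 :: t) : List Int).getD (j + 1 - 1) 0 = (h0 :: t)[j]'hj' := by
      simpa using List.getD_eq_getElem (h0 :: t) 0 hj'
    rw [lhs, r1, r2]

-- the loop body of A's port, named for the invariant lemma
def stepA (pref : List Int) (st : List Int × Int) (i : Int) : List Int × Int :=
  let v := PySem.Int.bxor (PySem.List.pyGetD pref i 0) st.2
  (st.1.set i.toNat v, PySem.Int.bxor st.2 v)

theorem loop_inv (pref : List Int) (hne : pref ≠ []) :
    ∀ (m k : Nat), m = pref.length - k → 1 ≤ k → k ≤ pref.length →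
    ((PySem.List.pyRange (k : Int) (pref.length : Int)).foldl (stepA pref)
      ((findArray_alt pref).take k ++ List.replicate (pref.length - k) 0,
       pref.getD (k - 1) 0)).1 = findArray_alt pref := by
  intro m
  induction m with
  | zero =>
    intro k hm hk1 hk2
    have h1 : PySem.List.pyRange (k : Int) (pref.length : Int) = [] := by
      simp [PySem.List.pyRange]
      omega
    rw [h1]
    have hkn : k = pref.length := by omega
    subst hkn
    simp [List.take_of_length_le (le_of_eq (alt_length pref hne))]
  | succ m ih =>
    intro k hm hk1 hk2
    have hkn : k < pref.length := by omega
    have hcons : PySem.List.pyRange (k : Int) (pref.length : Int) =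
        (k : Int) :: PySem.List.pyRange ((k : Int) + 1) (pref.length : Int) := by
      exact PySem.List.pyRange_one_cons (by exact_mod_cast hkn)
    rw [hcons, List.foldl_cons]
    have hgk : PySem.List.pyGetD pref (k : Int) 0 = pref.getD k 0 := by
      rw [PySem.List.pyGetD_natCast]
    have hv : PySem.Int.bxor (PySem.List.pyGetD pref (k : Int) 0) (pref.getD (k - 1) 0)
        = (findArray_alt pref).getD k 0 := by
      rw [hgk, alt_getD pref k hk1 hkn]
    have hlen : (findArray_alt pref).length = pref.length := alt_length pref hne
    have hset :
        (((findArray_alt pref).take k ++ List.replicate (pref.length - k) 0).set k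
          ((findArray_alt pref).getD k 0))
        = (findArray_alt pref).take (k + 1) ++ List.replicate (pref.length - (k + 1)) 0 := by
      have htk : ((findArray_alt pref).take k).length = k := by
        simp [hlen]; omega
      rw [List.set_append, htk]
      have : ¬ k < k := by omega
      simp only [this, if_false, Nat.sub_self]
      have hrep : List.replicate (pref.length - k) (0 : Int)
          = 0 :: List.replicate (pref.length - (k + 1)) 0 := by
        have : pref.length - k = (pref.length - (k + 1)) + 1 := by omega
        rw [this, List.replicate_succ]
      rw [hrep]
      have hkalt : k < (findArray_alt pref).length := by omega
      rw [List.take_add_one, List.getElem?_eq_getElem hkalt, Option.toList_some,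
          List.append_assoc, List.singleton_append, List.getD_eq_getElem _ _ hkalt,
          List.set_cons_zero]
    have htal : PySem.Int.bxor (pref.getD (k - 1) 0)
        (PySem.Int.bxor (PySem.List.pyGetD pref (k : Int) 0) (pref.getD (k - 1) 0))
        = pref.getD ((k + 1) - 1) 0 := by
      rw [hgk, bxor_cancel]
      simp
    have hstep : stepA pref
        ((findArray_alt pref).take k ++ List.replicate (pref.length - k) 0, pref.getD (k - 1) 0)
        ((k : Int))
        = ((findArray_alt pref).take (k + 1) ++ List.replicate (pref.length - (k + 1)) 0,
           pref.getD ((k + 1) - 1) 0) := by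
      simp only [stepA, Int.toNat_natCast]
      rw [htal, hv, hset]
    rw [hstep]
    have hcast : ((k : Int) + 1) = (((k + 1 : Nat)) : Int) := by push_cast; ring
    rw [hcast]
    exact ih (k + 1) (by omega) (by omega) (by omega)

-- ===== VERDICT (by name: the statement is the Claim_ definition above) =====
theorem findArray_spec : Claim_equal_findArray := by
  intro pref _ hpre
  unfold Spec_findArray findArray
  match pref, hpre with
  | h :: t, _ =>
    have hne : (h :: t) ≠ ([] : List Int) := by simp
    have h0 : PySem.List.pyGetD (h :: t) 0 0 = h := by
      simp [PySem.List.pyGetD]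
    simp only [List.length_cons, List.replicate_succ, List.set_cons_zero, h0]
    have h0' : PySem.List.pyGetD (h :: List.replicate t.length 0) 0 0 = h := by
      simp [PySem.List.pyGetD]
    rw [h0']
    have hinit : (h :: List.replicate t.length (0 : Int))
        = (findArray_alt (h :: t)).take 1 ++ List.replicate ((h :: t).length - 1) 0 := by
      simp [findArray_alt]
    have hgd : h = (h :: t).getD (1 - 1) 0 := by simp [List.getD]
    have := loop_inv (h :: t) hne ((h :: t).length - 1) 1 rfl (by omega)
      (by simp)
    rw [hinit]
    conv_lhs => rw [hgd]
    exact (this).symm ▸ this
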